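-- pv_equiv track=rewrite | github.com/mason0315/HMM | hmm_ner_complete.py | tags_to_words
-- ===== SOURCE A (Python) =====
-- from typing import List, Tuple, Dict, Set
--
-- def tags_to_words(chars: List[str], tags: List[str]) -> List[str]:
--     """将标签序列转换为词列表"""
--     words = []
--     word = ""
--     for char, tag in zip(chars, tags):
--         word += char
--         if tag in ('E', 'S'):
--             words.append(word)
--             word = ""
--     if word:
--         words.append(word)
--     return words
-- ===== SOURCE B (Python) =====
-- def tags_to_words(chars, tags):
--     """Recursive splitting: find the first E/S boundary, cut the segment, recurse on the rest."""
--     pairs = list(zip(chars, tags))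
--
--     def first_boundary(ps):
--         for i, (_, t) in enumerate(ps):
--             if t in ('E', 'S'):
--                 return i
--         return None
--
--     words = []
--     while pairs:
--         i = first_boundary(pairs)
--         if i is None:
--             tail = ''.join(c for c, _ in pairs)
--             if tail:
--                 words.append(tail)
--             break
--         words.append(''.join(c for c, _ in pairs[:i + 1]))
--         pairs = pairs[i + 1:]
--     return words
-- ===== Notes on version B (the rewrite author's own statement) =====
-- stated objective: alternative
-- what changed: Replaced A's single accumulator loop (grow a word string, flush on E/S, flush leftovers) by recursive splitting: repeatedly find the first E/S boundary in the remaining (char, tag) pairs, join and emit that slice, and recurse on the rest.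
import Mathlib
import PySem

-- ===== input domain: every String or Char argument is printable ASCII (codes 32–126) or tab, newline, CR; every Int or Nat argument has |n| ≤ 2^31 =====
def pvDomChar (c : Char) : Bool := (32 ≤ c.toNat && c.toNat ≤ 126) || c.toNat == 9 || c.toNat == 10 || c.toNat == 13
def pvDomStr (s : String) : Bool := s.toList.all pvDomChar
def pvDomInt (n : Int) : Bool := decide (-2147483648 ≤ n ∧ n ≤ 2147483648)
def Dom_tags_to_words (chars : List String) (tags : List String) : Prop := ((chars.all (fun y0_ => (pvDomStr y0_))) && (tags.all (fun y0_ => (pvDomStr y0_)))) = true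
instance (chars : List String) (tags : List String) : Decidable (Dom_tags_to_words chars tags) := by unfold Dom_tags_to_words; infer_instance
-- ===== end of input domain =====

-- B replaces A's single accumulator loop by recursive splitting at the first E/S boundary
-- (objective: alternative decomposition, same cost; no speed claim).

-- ===== PORT A =====
-- A: one pass over zip(chars, tags), growing a word accumulator, flushing at E/S and at the end.
-- A's loop body (word += char; flush the word on an E/S tag), named so the proofs can cite it.
def stepA (acc : List String × String) (ct : String × String) : List String × String :=
  let word := acc.2 ++ ct.1
  if ct.2 = "E" ∨ ct.2 = "S" then (acc.1 ++ [word], "") else (acc.1, word)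

def tags_to_words (chars : List String) (tags : List String) : List String :=
  let st := (chars.zip tags).foldl stepA ([], "")
  if st.2 ≠ "" then st.1 ++ [st.2] else st.1

-- ===== PORT B =====
-- Source B's first_boundary scan (a for/enumerate loop returning the first E/S index or None)
-- is ported by the standard-library List.findIdx?; the while loop is the structural recursion splitB.
def splitB (pairs : List (String × String)) : List String :=
  match hi : pairs.findIdx? (fun ct => ct.2 == "E" || ct.2 == "S") with
  | some i =>
      String.join ((pairs.take (i + 1)).map Prod.fst) :: splitB (pairs.drop (i + 1))
  | none =>
      let tail := String.join (pairs.map Prod.fst)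
      if tail ≠ "" then [tail] else []
termination_by pairs.length
decreasing_by
  cases pairs with
  | nil => simp at hi
  | cons a l => simp

def tags_to_words_alt (chars : List String) (tags : List String) : List String :=
  splitB (chars.zip tags)

-- ===== PRECONDITION & SPEC =====
def Spec_tags_to_words (chars : List String) (tags : List String) (out : List String) : Prop := out = tags_to_words_alt chars tags
instance (chars : List String) (tags : List String) (out : List String) : Decidable (Spec_tags_to_words chars tags out) := by unfold Spec_tags_to_words; infer_instance

-- ===== CLAIM (what is proved, stated in full; the proofs are below) =====
def Claim_equal_tags_to_words : Prop := ∀ (chars : List String) (tags : List String), Dom_tags_to_words chars tags → Spec_tags_to_words chars tags (tags_to_words chars tags)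

-- ===== LEMMAS AND PROOFS =====

theorem join_cons (a : String) (l : List String) :
    String.join (a :: l) = a ++ String.join l := by
  induction l generalizing a with
  | nil => simp [String.join]
  | cons b l ih =>
      have h1 : String.join (a :: b :: l) = String.join ((a ++ b) :: l) := by
        simp [String.join, List.foldl_cons]
      rw [h1, ih, ih b, String.append_assoc]

-- Recursive characterisation of A's loop + final flush.
def goW : List (String × String) → String → List String
  | [], w => if w ≠ "" then [w] else []
  | ct :: rest, w =>
      if ct.2 = "E" ∨ ct.2 = "S" then (w ++ ct.1) :: goW rest "" else goW rest (w ++ ct.1)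

theorem foldl_flush_eq_goW (p : List (String × String)) (acc : List String) (w : String) :
    (if (p.foldl stepA (acc, w)).2 ≠ "" then
        (p.foldl stepA (acc, w)).1 ++ [(p.foldl stepA (acc, w)).2]
      else (p.foldl stepA (acc, w)).1)
    = acc ++ goW p w := by
  induction p generalizing acc w with
  | nil =>
      by_cases h : w = "" <;> simp [goW, h]
  | cons ct rest ih =>
      by_cases h : ct.2 = "E" ∨ ct.2 = "S"
      · simp only [List.foldl_cons, stepA, goW, h, if_pos]
        rw [ih (acc ++ [w ++ ct.1]) ""]
        simp
      · simp only [List.foldl_cons, stepA, goW, h, if_neg, not_false_iff]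
        rw [ih acc (w ++ ct.1)]

-- splitB with an already-accumulated prefix word.
def splitBW (p : List (String × String)) (w : String) : List String :=
  match p.findIdx? (fun ct => ct.2 == "E" || ct.2 == "S") with
  | some i => (w ++ String.join ((p.take (i + 1)).map Prod.fst)) :: splitB (p.drop (i + 1))
  | none =>
      let tail := w ++ String.join (p.map Prod.fst)
      if tail ≠ "" then [tail] else []

theorem splitBW_empty (p : List (String × String)) : splitBW p "" = splitB p := by
  rw [splitB, splitBW]
  cases hi : p.findIdx? (fun ct => ct.2 == "E" || ct.2 == "S") <;> simp

theorem goW_eq_splitBW (p : List (String × String)) : ∀ w, goW p w = splitBW p w := by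
  induction p with
  | nil =>
      intro w
      by_cases h : w = "" <;> simp [goW, splitBW, String.join, h]
  | cons ct rest ih =>
      intro w
      by_cases h : ct.2 = "E" ∨ ct.2 = "S"
      · have hb : (ct.2 == "E" || ct.2 == "S") = true := by
          rcases h with h | h <;> simp [h]
        simp only [goW, h, if_pos]
        rw [ih ""]
        rw [splitBW_empty]
        simp [splitBW, List.findIdx?_cons, hb, String.join]
      · have hb : (ct.2 == "E" || ct.2 == "S") = false := by
          simp only [Bool.or_eq_false_iff, beq_eq_false_iff_ne]
          exact ⟨fun h1 => h (Or.inl h1), fun h2 => h (Or.inr h2)⟩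
        simp only [goW, h, if_neg, not_false_iff]
        rw [ih (w ++ ct.1)]
        rw [splitBW, splitBW]
        simp only [List.findIdx?_cons, hb, Bool.false_eq_true, if_neg, not_false_iff]
        cases hj : rest.findIdx? (fun ct => ct.2 == "E" || ct.2 == "S") with
        | none =>
            simp [join_cons, String.append_assoc]
        | some j =>
            simp [join_cons, String.append_assoc]

-- ===== VERDICT (by name: the statement is the Claim_ definition above) =====
theorem tags_to_words_spec : Claim_equal_tags_to_words := by
  intro chars tags _
  show tags_to_words chars tags = tags_to_words_alt chars tags
  rw [show tags_to_words chars tags = [] ++ goW (chars.zip tags) "" from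
        foldl_flush_eq_goW (chars.zip tags) [] "",
      goW_eq_splitBW, splitBW_empty]
  simp [tags_to_words_alt]
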